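-- pv_equiv track=rewrite | github.com/AkashWorld/AutoAttack | src/autoattack.py | find_index_of_emptyspace
-- ===== SOURCE A (Python) =====
-- def find_index_of_emptyspace(exploit_str, length):
--     """
--     Find index of first location in buffer that has a sequence of
--     bytes with empty null or 0x41 (A) characters of length
--     """
--     counter = 0
--     ret_index = -1
--     for (i, byte) in enumerate(exploit_str):
--         if byte != 0x00 and byte != 0x41:
--             counter = 0
--             continue
--         if counter == 0:
--             ret_index = i
--         counter += 1
--         if counter >= length:
--             return ret_index
--     return -1
-- ===== SOURCE B (Python) =====
-- def find_index_of_emptyspace(exploit_str, length):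
--     """Two staged passes instead of a counter state machine:
--     1. right-to-left DP: run[i] = size of the run of 0x00/0x41 bytes starting at i;
--     2. left-to-right: first index of a good byte whose run reaches length."""
--     n = len(exploit_str)
--     run = [0] * n
--     for i in range(n - 1, -1, -1):
--         if exploit_str[i] in (0x00, 0x41):
--             run[i] = 1 + (run[i + 1] if i + 1 < n else 0)
--     for i, r in enumerate(run):
--         if r and r >= length:
--             return i
--     return -1
-- ===== Notes on version B (the rewrite author's own statement) =====
-- stated objective: alternative
-- what changed: Replaces A's single-pass counter/ret_index state machine with two staged passes: a right-to-left DP array giving the size of the 0x00/0x41 run starting at each index, then a left-to-right search for the first good byte whose run size reaches length.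
import Mathlib
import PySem

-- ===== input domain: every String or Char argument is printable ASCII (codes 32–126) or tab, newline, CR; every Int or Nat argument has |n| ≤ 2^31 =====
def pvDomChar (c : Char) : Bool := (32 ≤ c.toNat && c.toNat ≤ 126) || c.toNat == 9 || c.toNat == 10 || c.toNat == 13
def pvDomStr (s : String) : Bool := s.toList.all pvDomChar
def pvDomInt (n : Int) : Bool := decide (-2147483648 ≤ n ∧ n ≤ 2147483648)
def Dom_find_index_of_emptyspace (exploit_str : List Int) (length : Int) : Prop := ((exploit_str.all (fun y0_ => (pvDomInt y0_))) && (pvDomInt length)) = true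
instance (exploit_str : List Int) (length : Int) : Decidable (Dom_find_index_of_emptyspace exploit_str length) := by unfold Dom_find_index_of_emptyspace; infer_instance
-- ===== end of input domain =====

-- B replaces A's single-pass counter state machine with two staged passes: a right-to-left DP array of run sizes, then a left-to-right search (alternative decomposition, same cost).


-- ===== PORT A =====
-- A's loop: enumerate bytes, reset counter on a bad byte, record run start in ret_index,
-- return ret_index as soon as counter >= length.
def aLoop (l : List Int) (i : Int) (counter : Int) (ret_index : Int) (length : Int) : Int :=
  match l with
  | [] => -1
  | b :: rest =>
    if b ≠ 0 ∧ b ≠ 65 then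
      aLoop rest (i + 1) 0 ret_index length
    else
      let ret' := if counter = 0 then i else ret_index
      let c' := counter + 1
      if length ≤ c' then ret' else aLoop rest (i + 1) c' ret' length

def find_index_of_emptyspace (exploit_str : List Int) (length : Int) : Int :=
  aLoop exploit_str 0 0 (-1) length

-- ===== PORT B =====
-- Stage 1 (B's right-to-left loop): run[i] = 1 + run[i+1] at a good byte, else 0;
-- the structural recursion builds the list right to left exactly as the loop fills it.
def runArr : List Int → List Nat
  | [] => []
  | b :: rest =>
    let r := runArr rest
    (if b = 0 ∨ b = 65 then r.headD 0 + 1 else 0) :: r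

-- Stage 2 (B's `for i, r in enumerate(run)`): first index whose run is nonempty and reaches length.
def searchRun (l : List Nat) (i : Int) (length : Int) : Int :=
  match l with
  | [] => -1
  | r :: rest => if 0 < r ∧ length ≤ (r : Int) then i else searchRun rest (i + 1) length

def find_index_of_emptyspace_alt (exploit_str : List Int) (length : Int) : Int :=
  searchRun (runArr exploit_str) 0 length

-- ===== PRECONDITION & SPEC =====
def Spec_find_index_of_emptyspace (exploit_str : List Int) (length : Int) (out : Int) : Prop := out = find_index_of_emptyspace_alt exploit_str length
instance (exploit_str : List Int) (length : Int) (out : Int) : Decidable (Spec_find_index_of_emptyspace exploit_str length out) := by unfold Spec_find_index_of_emptyspace; infer_instance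

-- ===== CLAIM (what is proved, stated in full; the proofs are below) =====
def Claim_equal_find_index_of_emptyspace : Prop := ∀ (exploit_str : List Int) (length : Int), Dom_find_index_of_emptyspace exploit_str length → Spec_find_index_of_emptyspace exploit_str length (find_index_of_emptyspace exploit_str length)

-- ===== LEMMAS AND PROOFS =====

-- Combined invariant, by one structural induction:
-- (a) out of a run (counter = 0) A's loop equals B's search over the DP array, for any ret_index;
-- (b) inside a run (counter ≥ 1, not yet returned) A returns the saved start s iff the
--     remaining head-run extends the counter to ≥ length; otherwise every index of the
--     unfinished run fails B's test too, so A's loop again equals B's search from i.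
theorem loop_equiv (l : List Int) :
    (∀ (i length r : Int), aLoop l i 0 r length = searchRun (runArr l) i length) ∧
    (∀ (i length c s : Int), 1 ≤ c → ¬ length ≤ c →
      aLoop l i c s length =
        if length ≤ c + ((runArr l).headD 0 : Int) then s
        else searchRun (runArr l) i length) := by
  induction l with
  | nil =>
    constructor
    · intro i length r; simp [aLoop, runArr, searchRun]
    · intro i length c s _ hlt
      simp [aLoop, runArr, searchRun]
      omega
  | cons b rest ih =>
    obtain ⟨ihA, ihB⟩ := ih
    have good_or_bad : (b = 0 ∨ b = 65) ∨ ¬ (b = 0 ∨ b = 65) := em _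
    have hRA : runArr (b :: rest) =
        (if b = 0 ∨ b = 65 then (runArr rest).headD 0 + 1 else 0) :: runArr rest := rfl
    constructor
    · intro i length r
      rcases good_or_bad with hg | hb
      · -- good byte: A enters a run with counter 1; the DP head is runLen rest + 1 > 0
        have hA : aLoop (b :: rest) i 0 r length =
            if length ≤ (1 : Int) then i else aLoop rest (i + 1) 1 i length := by
          simp only [aLoop]
          rcases hg with h | h <;> simp [h]
        rw [hA]
        rw [hRA, searchRun]
        simp only [if_pos hg]
        by_cases h1 : length ≤ (1 : Int)
        · rw [if_pos h1, if_pos (by constructor; omega; push_cast; omega)]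
        · rw [if_neg h1, ihB (i + 1) length 1 i (le_refl 1) h1]
          by_cases h2 : length ≤ 1 + ((runArr rest).headD 0 : Int)
          · rw [if_pos h2, if_pos (by constructor; omega; push_cast; omega)]
          · rw [if_neg h2, if_neg (by push_cast; omega)]
      · -- bad byte: both step past it (DP head is 0, fails the positivity test)
        have hA : aLoop (b :: rest) i 0 r length = aLoop rest (i + 1) 0 r length := by
          simp only [aLoop]
          rw [if_pos (by tauto)]
        rw [hA, hRA, searchRun, if_neg hb]
        rw [if_neg (by simp)]
        exact ihA (i + 1) length r
    · intro i length c s hc hlt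
      rcases good_or_bad with hg | hb
      · -- good byte inside the run
        have hA : aLoop (b :: rest) i c s length =
            if length ≤ c + 1 then s else aLoop rest (i + 1) (c + 1) s length := by
          simp only [aLoop]
          rcases hg with h | h <;> simp [h, show c ≠ 0 by omega]
        rw [hA, hRA]
        simp only [if_pos hg, List.headD_cons]
        by_cases h1 : length ≤ c + 1
        · rw [if_pos h1, if_pos (by push_cast; omega)]
        · rw [if_neg h1, ihB (i + 1) length (c + 1) s (by omega) h1]
          by_cases h2 : length ≤ c + 1 + ((runArr rest).headD 0 : Int)
          · rw [if_pos h2, if_pos (by push_cast; omega)]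
          · rw [if_neg h2, if_neg (by push_cast; omega)]
            rw [searchRun, if_neg (by push_cast; omega)]
      · -- bad byte ends the run without reaching length
        have hA : aLoop (b :: rest) i c s length = aLoop rest (i + 1) 0 s length := by
          simp only [aLoop]
          rw [if_pos (by tauto)]
        rw [hA, ihA, hRA]
        simp only [if_neg hb, List.headD_cons]
        rw [if_neg (by push_cast; omega)]
        rw [searchRun, if_neg (by simp)]

-- ===== VERDICT (by name: the statement is the Claim_ definition above) =====
theorem find_index_of_emptyspace_spec : Claim_equal_find_index_of_emptyspace := by
  intro l length _
  unfold Spec_find_index_of_emptyspace find_index_of_emptyspace find_index_of_emptyspace_alt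
  exact (loop_equiv l).1 0 length (-1)
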